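-- pv_equiv track=rewrite | github.com/Gabrie50/bot-bacbo | main.py | _calcular_max_streak
-- ===== SOURCE A (Python) =====
-- def _calcular_max_streak(historico):
--     max_streak = 0
--     streak_atual = 0
--
--     for rodada in historico:
--         if rodada['resultado'] != 'TIE':
--             streak_atual += 1
--             max_streak = max(max_streak, streak_atual)
--         else:
--             streak_atual = 0
--
--     return max_streak
-- ===== SOURCE B (Python) =====
-- def _calcular_max_streak(historico):
--     # Run-based scan: split the rounds into maximal runs of non-TIE flags
--     # and take the longest run, instead of maintaining a current/max counter.
--     flags = [rodada['resultado'] != 'TIE' for rodada in historico]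
--     best = 0
--     n = len(flags)
--     i = 0
--     while i < n:
--         if flags[i]:
--             j = i
--             while j < n and flags[j]:
--                 j += 1
--             if j - i > best:
--                 best = j - i
--             i = j
--         else:
--             i += 1
--     return best
-- ===== Notes on version B (the rewrite author's own statement) =====
-- stated objective: alternative
-- what changed: B first maps each round to a non-TIE boolean flag, then scans run by run (measuring each maximal run of consecutive non-TIE flags and keeping the longest), instead of A's element-by-element current/max counter pair.
import Mathlib
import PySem

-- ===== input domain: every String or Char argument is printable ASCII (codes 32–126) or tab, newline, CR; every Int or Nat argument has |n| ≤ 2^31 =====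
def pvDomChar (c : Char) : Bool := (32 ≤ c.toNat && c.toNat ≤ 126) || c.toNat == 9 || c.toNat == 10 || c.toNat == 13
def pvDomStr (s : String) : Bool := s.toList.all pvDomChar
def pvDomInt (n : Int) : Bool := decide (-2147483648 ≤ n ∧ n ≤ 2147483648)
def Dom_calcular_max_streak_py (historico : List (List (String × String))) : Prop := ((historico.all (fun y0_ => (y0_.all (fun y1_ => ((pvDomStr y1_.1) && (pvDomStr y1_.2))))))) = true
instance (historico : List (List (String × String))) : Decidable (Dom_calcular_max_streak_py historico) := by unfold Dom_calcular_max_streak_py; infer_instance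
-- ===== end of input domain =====

-- B replaces A's element-wise current/max counter pair with a flags-then-runs scan
-- (longest maximal run of non-TIE flags); objective: alternative decomposition.

-- ===== PORT A =====
-- A: one pass, state (max_streak, streak_atual); rodada['resultado'] is a first-match
-- dict lookup (getD "" is only reached outside Pre_, where Python raises KeyError).
def calcular_max_streak_py (historico : List (List (String × String))) : Int :=
  (historico.foldl
    (fun (st : Int × Int) rodada =>
      if ((PySem.Dict.mk rodada).get? "resultado").getD "" ≠ "TIE" then
        (max st.1 (st.2 + 1), st.2 + 1)
      else
        (st.1, 0))
    (0, 0)).1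

-- ===== PORT B =====
-- the flag rodada['resultado'] != 'TIE' of Source B's comprehension
def pvFlag (rodada : List (String × String)) : Bool :=
  ((PySem.Dict.mk rodada).get? "resultado").getD "" ≠ "TIE"

-- Source B's outer while-loop over the flag list: skip a False flag, or measure the
-- whole leading True run (the inner while) and continue after it.
def pvRunsMax : List Bool → Int
  | [] => 0
  | false :: t => pvRunsMax t
  | true :: t => max (1 + (t.takeWhile id).length) (pvRunsMax (t.dropWhile id))
termination_by l => l.length
decreasing_by
  · simp
  · have := List.length_dropWhile_le (p := id) (l := t)
    simp; omega

def calcular_max_streak_py_alt (historico : List (List (String × String))) : Int :=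
  pvRunsMax (historico.map pvFlag)

-- ===== PRECONDITION & SPEC =====
-- Pre_ excludes only inputs where some round lacks the key 'resultado': there the
-- Python A (and B alike) raises KeyError.
def Pre_calcular_max_streak_py (historico : List (List (String × String))) : Prop :=
  ∀ rodada ∈ historico, ((PySem.Dict.mk rodada).get? "resultado").isSome = true
instance (historico : List (List (String × String))) : Decidable (Pre_calcular_max_streak_py historico) := by unfold Pre_calcular_max_streak_py; infer_instance

def pvWitness_calcular_max_streak_py : (List (List (String × String))) :=
  [[("resultado", "P")], [("resultado", "TIE")], [("resultado", "B")]]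

def Spec_calcular_max_streak_py (historico : List (List (String × String))) (out : Int) : Prop := out = calcular_max_streak_py_alt historico
instance (historico : List (List (String × String))) (out : Int) : Decidable (Spec_calcular_max_streak_py historico out) := by unfold Spec_calcular_max_streak_py; infer_instance

-- ===== CLAIM (what is proved, stated in full; the proofs are below) =====
def Claim_equal_calcular_max_streak_py : Prop := ∀ (historico : List (List (String × String))), Dom_calcular_max_streak_py historico → Pre_calcular_max_streak_py historico → Spec_calcular_max_streak_py historico (calcular_max_streak_py historico)

-- ===== LEMMAS AND PROOFS =====

-- future-maxima function: value still to be recorded by A's fold from state streak c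
def pvBest : Int → List Bool → Int
  | _, [] => 0
  | c, true :: t => max (c + 1) (pvBest (c + 1) t)
  | _, false :: t => pvBest 0 t

theorem pvFoldA_eq_best (l : List Bool) : ∀ (m c : Int), 0 ≤ m →
    (l.foldl (fun (st : Int × Int) b =>
        if b then (max st.1 (st.2 + 1), st.2 + 1) else (st.1, 0)) (m, c)).1
    = max m (pvBest c l) := by
  induction l with
  | nil => intro m c hm; simp [pvBest]; omega
  | cons b t ih =>
    intro m c hm
    cases b with
    | true =>
      rw [List.foldl_cons, if_pos rfl, ih (max m (c + 1)) (c + 1) (by omega)]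
      simp only [pvBest]
      omega
    | false =>
      simpa only [List.foldl_cons, Bool.false_eq_true, if_false, pvBest] using ih m 0 hm

theorem pvBest_nonneg (l : List Bool) : ∀ (c : Int), 0 ≤ pvBest c l := by
  induction l with
  | nil => intro c; simp [pvBest]
  | cons b t ih =>
    intro c
    cases b with
    | true => have := ih (c + 1); simp only [pvBest]; omega
    | false => simpa only [pvBest] using ih 0

theorem pvBest_true (t : List Bool) : ∀ (c : Int), 0 ≤ c →
    pvBest c (true :: t) = max (c + 1 + (t.takeWhile id).length) (pvBest 0 (t.dropWhile id)) := by
  induction t with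
  | nil => intro c hc; simp [pvBest]
  | cons b t' ih =>
    intro c hc
    cases b with
    | true =>
      rw [show pvBest c (true :: true :: t') = max (c + 1) (pvBest (c + 1) (true :: t')) from rfl]
      rw [ih (c + 1) (by omega)]
      simp only [List.takeWhile_cons, List.dropWhile_cons, id_eq, if_true, List.length_cons]
      push_cast
      omega
    | false =>
      rw [show pvBest c (true :: false :: t') = max (c + 1) (pvBest 0 t') from rfl]
      simp [pvBest]

theorem pvBest_zero_eq_runsMax (l : List Bool) : pvBest 0 l = pvRunsMax l := by
  induction l using pvRunsMax.induct with
  | case1 => simp [pvBest, pvRunsMax]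
  | case2 t ih => simpa [pvBest, pvRunsMax] using ih
  | case3 t ih =>
    rw [pvBest_true t 0 le_rfl, pvRunsMax, ih]
    norm_num

-- ===== VERDICT (by name: the statement is the Claim_ definition above) =====
theorem calcular_max_streak_py_spec : Claim_equal_calcular_max_streak_py := by
  intro historico _ _
  unfold Spec_calcular_max_streak_py calcular_max_streak_py calcular_max_streak_py_alt
  rw [← pvBest_zero_eq_runsMax]
  have h : (fun (st : Int × Int) rodada =>
        if ((PySem.Dict.mk rodada).get? "resultado").getD "" ≠ "TIE" then
          (max st.1 (st.2 + 1), st.2 + 1)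
        else (st.1, 0)) = (fun (st : Int × Int) rodada =>
        if pvFlag rodada then (max st.1 (st.2 + 1), st.2 + 1) else (st.1, 0)) := by
    funext st rodada
    simp [pvFlag]
  rw [h]
  rw [← List.foldl_map (f := pvFlag)
      (g := fun (st : Int × Int) b => if b then (max st.1 (st.2 + 1), st.2 + 1) else (st.1, 0))]
  have hb := pvBest_nonneg (historico.map pvFlag) 0
  rw [pvFoldA_eq_best _ 0 0 le_rfl]
  omega
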